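-- pv_equiv track=rewrite | github.com/yrod15x/Python | De Otros Py/coin_flip.py | secuencia_sello
-- ===== SOURCE A (Python) =====
-- def secuencia_sello(lanzamientos):
--     """Mide si una moneda cae en sello de una lista se repite 6 veces"""
--     cont_sellos = 0
--     contador_general = 0
--     for probabilidad in lanzamientos:
--         if probabilidad == 'S':
--             cont_sellos += 1
--             if cont_sellos == 6:
--                 contador_general += 1
--         else:
--             cont_sellos = 0
--     return contador_general
-- ===== SOURCE B (Python) =====
-- def secuencia_sello(lanzamientos):
--     """Count maximal runs of consecutive 'S' of length >= 6."""
--     total = 0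
--     i = 0
--     n = len(lanzamientos)
--     while i < n:
--         if lanzamientos[i] != 'S':
--             i += 1
--             continue
--         j = i + 1
--         while j < n and lanzamientos[j] == 'S':
--             j += 1
--         if j - i >= 6:
--             total += 1
--         i = j
--     return total
-- ===== Notes on version B (the rewrite author's own statement) =====
-- stated objective: alternative
-- what changed: B partitions the sequence into maximal runs of consecutive 'S' and counts the runs of length >= 6, instead of A's running counter that fires when it hits exactly 6.
import Mathlib
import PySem

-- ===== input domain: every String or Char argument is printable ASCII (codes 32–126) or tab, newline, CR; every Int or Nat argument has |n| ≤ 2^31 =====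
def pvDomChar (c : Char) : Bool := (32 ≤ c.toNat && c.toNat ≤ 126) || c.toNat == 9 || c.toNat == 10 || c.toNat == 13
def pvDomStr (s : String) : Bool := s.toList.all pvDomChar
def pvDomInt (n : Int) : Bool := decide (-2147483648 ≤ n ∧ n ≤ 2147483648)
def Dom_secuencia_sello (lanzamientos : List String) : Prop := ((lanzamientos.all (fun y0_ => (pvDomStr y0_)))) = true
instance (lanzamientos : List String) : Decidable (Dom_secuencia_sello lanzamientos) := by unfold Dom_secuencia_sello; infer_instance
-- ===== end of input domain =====

-- B counts maximal runs of consecutive "S" of length ≥ 6; A keeps a running counter that fires at exactly 6. Same value, different decomposition.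

-- ===== PORT A =====
-- one step of A's loop: state = (cont_sellos, contador_general)
def pvStepA (st : Int × Int) (probabilidad : String) : Int × Int :=
  if probabilidad == "S" then
    (st.1 + 1, if st.1 + 1 == 6 then st.2 + 1 else st.2)
  else (0, st.2)

def secuencia_sello (lanzamientos : List String) : Int :=
  (lanzamientos.foldl pvStepA (0, 0)).2

-- ===== PORT B =====
def secuencia_sello_alt (lanzamientos : List String) : Int :=
  match lanzamientos with
  | [] => 0
  | x :: xs =>
    if x == "S" then
      (if 6 ≤ 1 + (xs.takeWhile (· == "S")).length then (1 : Int) else 0)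
        + secuencia_sello_alt (xs.dropWhile (· == "S"))
    else secuencia_sello_alt xs
termination_by lanzamientos.length
decreasing_by
  · exact Nat.lt_succ_of_le (xs.length_dropWhile_le _)
  · simp

-- ===== PRECONDITION & SPEC =====
def Spec_secuencia_sello (lanzamientos : List String) (out : Int) : Prop := out = secuencia_sello_alt lanzamientos
instance (lanzamientos : List String) (out : Int) : Decidable (Spec_secuencia_sello lanzamientos out) := by unfold Spec_secuencia_sello; infer_instance

-- ===== CLAIM (what is proved, stated in full; the proofs are below) =====
def Claim_equal_secuencia_sello : Prop := ∀ (lanzamientos : List String), Dom_secuencia_sello lanzamientos → Spec_secuencia_sello lanzamientos (secuencia_sello lanzamientos)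

-- ===== LEMMAS AND PROOFS =====

-- A's fold over a block of k consecutive "S" from counter c ≥ 0: the counter passes 6 at most once
lemma foldA_replicate (k : Nat) : ∀ (c t : Int), 0 ≤ c →
    List.foldl pvStepA (c, t) (List.replicate k "S")
      = (c + k, if c < 6 ∧ 6 ≤ c + k then t + 1 else t) := by
  induction k with
  | zero => intro c t hc; simp
  | succ k ih =>
    intro c t hc
    rw [List.replicate_succ]
    simp only [List.foldl_cons, pvStepA, BEq.rfl, if_pos]
    rw [ih (c + 1) _ (by omega)]
    have : ((c + 1 == 6) = true) ↔ c + 1 = 6 := by simp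
    rw [Prod.mk.injEq]
    refine ⟨by push_cast; ring, ?_⟩
    by_cases h6 : c + 1 = 6 <;> split_ifs <;>
      simp_all <;> push_cast at * <;> omega

lemma takeWhile_S_replicate (xs : List String) :
    xs.takeWhile (· == "S") = List.replicate (xs.takeWhile (· == "S")).length "S" := by
  rw [List.eq_replicate_iff]
  refine ⟨rfl, fun b hb => ?_⟩
  have := List.mem_takeWhile_imp hb
  simpa using this

lemma dropWhile_head_ne (xs : List String) (y : String) (ys : List String)
    (h : xs.dropWhile (· == "S") = y :: ys) : ¬ (y = "S") := by
  have := List.head?_dropWhile_not (· == "S") xs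
  rw [h] at this
  simpa using this

lemma key : ∀ (n : Nat) (l : List String) (t : Int), l.length ≤ n →
    (List.foldl pvStepA (0, t) l).2 = t + secuencia_sello_alt l := by
  intro n
  induction n with
  | zero =>
    intro l t hl
    have : l = [] := List.eq_nil_of_length_eq_zero (Nat.le_zero.mp hl)
    subst this; simp [secuencia_sello_alt]
  | succ n ih =>
    intro l t hl
    match l with
    | [] => simp [secuencia_sello_alt]
    | x :: xs =>
      by_cases hx : x = "S"
      · subst hx
        have hxs : xs.takeWhile (· == "S") ++ xs.dropWhile (· == "S") = xs :=
          List.takeWhile_append_dropWhile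
        have hfold : List.foldl pvStepA ((0 : Int), t) ("S" :: xs)
            = List.foldl pvStepA (List.foldl pvStepA ((1 : Int), t) (xs.takeWhile (· == "S")))
                (xs.dropWhile (· == "S")) := by
          have hstep0 : pvStepA ((0:Int), t) "S" = (1, t) := by norm_num [pvStepA]
          rw [List.foldl_cons, hstep0]
          conv_lhs => rw [← hxs]
          rw [List.foldl_append]
        have hrun := foldA_replicate (xs.takeWhile (· == "S")).length 1 t (by norm_num)
        rw [← takeWhile_S_replicate xs] at hrun
        have hxslen : xs.length ≤ n := by simpa using hl
        have haltd : secuencia_sello_alt ("S" :: xs)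
            = (if 6 ≤ 1 + (xs.takeWhile (· == "S")).length then (1 : Int) else 0)
              + secuencia_sello_alt (xs.dropWhile (· == "S")) := by
          rw [secuencia_sello_alt]; simp
        rw [hfold, hrun, haltd]
        have hc : ((1:Int) < 6 ∧ (6:Int) ≤ 1 + ((xs.takeWhile (· == "S")).length : Int))
            ↔ (6 ≤ 1 + (xs.takeWhile (· == "S")).length) := by
          constructor
          · rintro ⟨-, h⟩; omega
          · intro h; exact ⟨by norm_num, by omega⟩
        rcases hdm : xs.dropWhile (· == "S") with _ | ⟨y, ys⟩
        · have halte : secuencia_sello_alt ([] : List String) = 0 := by rw [secuencia_sello_alt]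
          rw [List.foldl_nil, halte, if_congr hc rfl rfl]
          split_ifs <;> omega
        · have hy : ¬ (y = "S") := dropWhile_head_ne xs y ys hdm
          have hstep : pvStepA ((1 : Int) + (xs.takeWhile (· == "S")).length,
              if (1:Int) < 6 ∧ (6:Int) ≤ 1 + (xs.takeWhile (· == "S")).length then t + 1 else t) y
              = (0, if (1:Int) < 6 ∧ (6:Int) ≤ 1 + (xs.takeWhile (· == "S")).length then t + 1 else t) := by
            simp [pvStepA, hy]
          have hyslen : ys.length ≤ n := by
            have h := xs.length_dropWhile_le (· == "S")
            rw [hdm] at h; simp at h; omega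
          rw [List.foldl_cons, hstep, ih ys _ hyslen]
          have halty : secuencia_sello_alt (y :: ys) = secuencia_sello_alt ys := by
            rw [secuencia_sello_alt]; simp [hy]
          rw [halty, if_congr hc rfl rfl]
          split_ifs <;> omega
      · have hfold : List.foldl pvStepA ((0 : Int), t) (x :: xs)
            = List.foldl pvStepA ((0 : Int), t) xs := by
          simp [pvStepA, hx]
        have halt : secuencia_sello_alt (x :: xs) = secuencia_sello_alt xs := by
          rw [secuencia_sello_alt]; simp [hx]
        rw [hfold, halt]
        exact ih xs t (by simpa using hl)

-- ===== VERDICT (by name: the statement is the Claim_ definition above) =====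
theorem secuencia_sello_spec : Claim_equal_secuencia_sello := by
  intro l _
  show secuencia_sello l = secuencia_sello_alt l
  have := key l.length l 0 le_rfl
  simpa [secuencia_sello] using this
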